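-- pv_equiv track=rewrite | github.com/Khadaassi/Simplon_Rawina | Api/main.py | clean_story
-- ===== SOURCE A (Python) =====
-- def clean_story(text: str, prompt: str) -> str:
--     story = text.replace(prompt, "").strip()
--     stopwords = ["Once upon a time", "Theme:", "Example:", "Now write another", "Table of Contents", "Book", "Chapter"]
--     for stop in stopwords:
--         parts = story.split(stop)
--         if len(parts) > 1:
--             story = parts[0].strip()
--     return story.strip()
-- ===== SOURCE B (Python) =====
-- STOPWORDS = ["Once upon a time", "Theme:", "Example:", "Now write another", "Table of Contents", "Book", "Chapter"]
--
-- def clean_story(text: str, prompt: str) -> str: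
--     story = text.replace(prompt, "").strip()
--     positions = [p for p in (story.find(stop) for stop in STOPWORDS) if p != -1]
--     if not positions:
--         return story
--     return story[:min(positions)].strip()
-- ===== Notes on version B (the rewrite author's own statement) =====
-- stated objective: simpler
-- what changed: Instead of A's progressive split-and-reassign loop that repeatedly truncates and re-strips the story at each stopword in turn, B computes each stopword's find position once, truncates a single time at the smallest found position, and strips once; the two agree because no stopword overlaps another, so the earliest stopword occurrence is the final cut point either way.
import Mathlib
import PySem

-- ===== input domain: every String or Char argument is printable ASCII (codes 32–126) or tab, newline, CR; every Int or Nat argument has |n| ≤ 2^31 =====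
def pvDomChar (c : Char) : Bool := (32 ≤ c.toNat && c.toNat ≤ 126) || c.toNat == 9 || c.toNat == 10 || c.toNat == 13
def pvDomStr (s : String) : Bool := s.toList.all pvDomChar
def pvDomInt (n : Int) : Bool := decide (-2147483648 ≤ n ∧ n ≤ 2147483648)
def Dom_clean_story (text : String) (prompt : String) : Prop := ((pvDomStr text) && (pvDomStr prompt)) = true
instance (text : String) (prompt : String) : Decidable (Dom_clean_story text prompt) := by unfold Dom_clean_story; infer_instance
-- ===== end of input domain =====

-- B replaces A's progressive split-and-reassign loop by a single truncation at the minimum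
-- find-position of any stopword (objective: simpler); equal because no stopword can overlap another.

-- ===== PORT A =====
def pvStopwords : List (List Char) :=
  ["Once upon a time".toList, "Theme:".toList, "Example:".toList, "Now write another".toList,
   "Table of Contents".toList, "Book".toList, "Chapter".toList]

-- one iteration of A's `for stop in stopwords` body
def pvCleanStep (story stop : List Char) : List Char :=
  let parts := PySem.Chars.splitOn story stop
  if 1 < parts.length then PySem.Chars.strip (PySem.List.pyGetD parts 0 []) else story

def clean_story (text : String) (prompt : String) : String :=
  let story := PySem.Chars.strip (PySem.Chars.replace text.toList prompt.toList [])
  String.ofList (PySem.Chars.strip (pvStopwords.foldl pvCleanStep story))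

-- ===== PORT B =====
def clean_story_alt (text : String) (prompt : String) : String :=
  let story := PySem.Chars.strip (PySem.Chars.replace text.toList prompt.toList [])
  let positions := (pvStopwords.map (fun stop => PySem.Chars.find story stop)).filter
      (fun p => decide (p ≠ -1))
  match PySem.List.min? positions id with
  | none => String.ofList story
  | some cut => String.ofList (PySem.Chars.strip (PySem.List.slice story none (some cut)))

-- ===== PRECONDITION & SPEC =====
def Spec_clean_story (text : String) (prompt : String) (out : String) : Prop := out = clean_story_alt text prompt
instance (text : String) (prompt : String) (out : String) : Decidable (Spec_clean_story text prompt out) := by unfold Spec_clean_story; infer_instance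

-- ===== CLAIM (what is proved, stated in full; the proofs are below) =====
def Claim_equal_clean_story : Prop := ∀ (text : String) (prompt : String), Dom_clean_story text prompt → Spec_clean_story text prompt (clean_story text prompt)

-- ===== LEMMAS AND PROOFS =====

-- t cannot overlap an occurrence of s placed to its right: no nonempty proper tail of t
-- is prefix-comparable with s (checked by `decide` for the seven stopword literals)
def pvNoOv (t s : List Char) : Prop :=
  ∀ d, d < t.length → 0 < d → ¬ (t.drop d <+: s ∨ s <+: t.drop d)

-- a usable stopword: nonempty, and its last character is not whitespace
def pvGood (t : List Char) : Prop :=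
  t ≠ [] ∧ ∀ h : t ≠ [], PySem.Chars.isspace (t.getLast h) = false

-- B's cut, as a function of the stripped story S and the stopword list L
def pvMinCut (S : List Char) (L : List (List Char)) : List Char :=
  match PySem.List.min? ((L.map (fun stop => PySem.Chars.find S stop)).filter
      (fun p => decide (p ≠ -1))) id with
  | none => S
  | some m => PySem.Chars.strip (S.take m.toNat)

-- ---- strip facts ----

lemma pv_rstrip_prefix (cs : List Char) : PySem.Chars.rstrip cs <+: cs := by
  have h := List.dropWhile_suffix (l := cs.reverse) PySem.Chars.isspace
  have : (List.dropWhile PySem.Chars.isspace cs.reverse).reverse <+: cs.reverse.reverse :=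
    List.reverse_prefix.mpr h
  simpa [PySem.Chars.rstrip] using this

lemma pv_rstrip_eq_take (cs : List Char) :
    PySem.Chars.rstrip cs = cs.take (PySem.Chars.rstrip cs).length :=
  List.prefix_iff_eq_take.mp (pv_rstrip_prefix cs)

lemma pv_rstrip_drop_ws (cs : List Char) (j : Nat)
    (h1 : (PySem.Chars.rstrip cs).length ≤ j) (h2 : j < cs.length) :
    PySem.Chars.isspace cs[j] = true := by
  set r := (PySem.Chars.rstrip cs).length with hr
  have hdrop : cs.drop r = (List.takeWhile PySem.Chars.isspace cs.reverse).reverse := by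
    have hsplit : List.takeWhile PySem.Chars.isspace cs.reverse ++
        List.dropWhile PySem.Chars.isspace cs.reverse = cs.reverse :=
      List.takeWhile_append_dropWhile
    have h0 := congrArg List.reverse hsplit
    simp only [List.reverse_append, List.reverse_reverse] at h0
    have h3 : PySem.Chars.rstrip cs ++ (List.takeWhile PySem.Chars.isspace cs.reverse).reverse = cs := by
      simpa [PySem.Chars.rstrip] using h0
    calc cs.drop r = (PySem.Chars.rstrip cs ++ (List.takeWhile PySem.Chars.isspace cs.reverse).reverse).drop r := by rw [h3]
    _ = (List.takeWhile PySem.Chars.isspace cs.reverse).reverse := by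
          rw [List.drop_append_of_le_length (by omega)]
          simp [hr]
  have hmem : cs[j] ∈ cs.drop r := by
    have hj : j - r < (cs.drop r).length := by simp [List.length_drop]; omega
    have he : (cs.drop r)[j - r] = cs[j] := by
      rw [List.getElem_drop]; congr 1; omega
    rw [← he]; exact List.getElem_mem hj
  rw [hdrop] at hmem
  exact List.mem_takeWhile_imp (List.mem_reverse.mp hmem)

lemma pv_rstrip_last (cs : List Char) (h : PySem.Chars.rstrip cs ≠ []) :
    PySem.Chars.isspace ((PySem.Chars.rstrip cs).getLast h) = false := by
  have hrev : (PySem.Chars.rstrip cs).reverse = List.dropWhile PySem.Chars.isspace cs.reverse := by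
    simp [PySem.Chars.rstrip]
  have hne : List.dropWhile PySem.Chars.isspace cs.reverse ≠ [] := by
    intro h0; apply h
    have := congrArg List.reverse hrev
    simpa [h0] using this
  have hh := List.head_dropWhile_not (p := PySem.Chars.isspace) (l := cs.reverse) hne
  have e : (PySem.Chars.rstrip cs).getLast h = (List.dropWhile PySem.Chars.isspace cs.reverse).head hne := by
    apply Option.some.inj
    rw [← List.head?_eq_head, ← List.getLast?_eq_getLast, ← List.head?_reverse, hrev]
  rw [e, hh]

lemma pv_rstrip_of_last (cs : List Char)
    (h : ∀ hl : cs ≠ [], PySem.Chars.isspace (cs.getLast hl) = false) :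
    PySem.Chars.rstrip cs = cs := by
  rcases eq_or_ne cs [] with rfl | hne
  · simp [PySem.Chars.rstrip]
  · have hdw : List.dropWhile PySem.Chars.isspace cs.reverse = cs.reverse := by
      rw [List.dropWhile_eq_self_iff]
      intro hl
      have e : cs.reverse[0] = cs.getLast hne := by
        rw [List.getElem_reverse, List.getLast_eq_getElem]
        simp
      rw [e, h hne]
      simp
    simp [PySem.Chars.rstrip, hdw]

lemma pv_lstrip_of_head (cs : List Char)
    (h : ∀ hl : 0 < cs.length, PySem.Chars.isspace cs[0] = false) :
    PySem.Chars.lstrip cs = cs := by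
  rw [PySem.Chars.lstrip, List.dropWhile_eq_self_iff]
  intro hl
  rw [h hl]; simp

lemma pv_lstrip_head? (cs : List Char) (c : Char)
    (h : (PySem.Chars.lstrip cs).head? = some c) : PySem.Chars.isspace c = false := by
  have hne : List.dropWhile PySem.Chars.isspace cs ≠ [] := by
    intro h0
    rw [PySem.Chars.lstrip] at h
    rw [h0] at h; simp at h
  have hh := List.head_dropWhile_not (p := PySem.Chars.isspace) (l := cs) hne
  have e : (PySem.Chars.lstrip cs).head? = some ((List.dropWhile PySem.Chars.isspace cs).head hne) := by
    rw [PySem.Chars.lstrip, List.head?_eq_head]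
  rw [e] at h
  rw [← Option.some.inj h, hh]

lemma pv_strip_head? (cs : List Char) (c : Char)
    (h : (PySem.Chars.strip cs).head? = some c) : PySem.Chars.isspace c = false := by
  apply pv_lstrip_head? cs c
  have hpre : PySem.Chars.strip cs <+: PySem.Chars.lstrip cs := by
    rw [PySem.Chars.strip]; exact pv_rstrip_prefix _
  obtain ⟨t, ht⟩ := hpre
  rw [← ht, List.head?_append_of_ne_nil]
  · exact h
  · intro h0; rw [h0] at h; simp at h

lemma pv_strip_idem (cs : List Char) :
    PySem.Chars.strip (PySem.Chars.strip cs) = PySem.Chars.strip cs := by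
  have h1 : PySem.Chars.lstrip (PySem.Chars.strip cs) = PySem.Chars.strip cs := by
    apply pv_lstrip_of_head
    intro hl
    apply pv_strip_head? cs
    rw [List.head?_eq_head (by intro h0; rw [h0] at hl; simp at hl), List.head_eq_getElem]
  show PySem.Chars.rstrip (PySem.Chars.lstrip (PySem.Chars.strip cs)) = _
  rw [h1]
  apply pv_rstrip_of_last
  intro hl
  show PySem.Chars.isspace ((PySem.Chars.rstrip (PySem.Chars.lstrip cs)).getLast _) = false
  exact pv_rstrip_last _ _

lemma pv_stripped_head (S : List Char) (hS : PySem.Chars.strip S = S)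
    (h : 0 < S.length) : PySem.Chars.isspace S[0] = false := by
  apply pv_strip_head? S
  rw [hS, List.head?_eq_head (by intro h0; rw [h0] at h; simp at h), List.head_eq_getElem]

-- ---- find and splitOn facts ----

lemma pv_infix_of_prefix_drop (S sub : List Char) (q : Nat) (hq : sub <+: S.drop q) :
    sub <:+: S :=
  hq.isInfix.trans (List.drop_suffix q S).isInfix

lemma pv_find_eq_of (S sub : List Char) (q : Nat)
    (hq : sub <+: S.drop q) (hmin : ∀ i < q, ¬ sub <+: S.drop i) :
    PySem.Chars.find S sub = (q : Int) := by
  have hnn : 0 ≤ PySem.Chars.find S sub := by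
    rw [PySem.Chars.find_nonneg_iff]
    exact pv_infix_of_prefix_drop S sub q hq
  obtain ⟨h1, h2⟩ := PySem.Chars.find_spec hnn
  set f := (PySem.Chars.find S sub).toNat with hf
  have hfe : PySem.Chars.find S sub = (f : Int) := (Int.toNat_of_nonneg hnn).symm
  rcases lt_trichotomy f q with h | h | h
  · exact absurd h1 (hmin f h)
  · rw [hfe, h]
  · exact absurd hq (h2 q h)

-- splitOn.go facts
lemma pv_go_acc (sep : List Char) (fuel : Nat) (l cur : List Char) (acc : List (List Char)) :
    ∃ out, out ≠ [] ∧ PySem.Chars.splitOn.go sep fuel l cur acc = acc.reverse ++ out := by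
  induction fuel generalizing l cur acc with
  | zero =>
    exact ⟨[cur.reverse ++ l], by simp, by rw [PySem.Chars.splitOn.go]; simp⟩
  | succ fuel ih =>
    cases l with
    | nil => exact ⟨[cur.reverse], by simp, by rw [PySem.Chars.splitOn.go] <;> simp⟩
    | cons c rest =>
      rw [PySem.Chars.splitOn.go]
      by_cases hp : sep.isPrefixOf (c :: rest)
      · simp only [hp, if_true]
        obtain ⟨out, hne, he⟩ := ih (List.drop sep.length (c :: rest)) [] (cur.reverse :: acc)
        exact ⟨cur.reverse :: out, by simp, by rw [he]; simp⟩
      · simp only [hp, if_false]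
        exact ih rest (c :: cur) acc

lemma pv_go_no (sep : List Char) (fuel : Nat) (l cur : List Char) (acc : List (List Char))
    (hno : ∀ j, ¬ sep <+: l.drop j) (hf : l.length < fuel) :
    PySem.Chars.splitOn.go sep fuel l cur acc = ((cur.reverse ++ l) :: acc).reverse := by
  induction l generalizing fuel cur with
  | nil =>
    obtain ⟨fuel, rfl⟩ : ∃ f, fuel = f + 1 := ⟨fuel - 1, by omega⟩
    rw [PySem.Chars.splitOn.go] <;> simp
  | cons c rest ih =>
    obtain ⟨fuel, rfl⟩ : ∃ f, fuel = f + 1 := ⟨fuel - 1, by omega⟩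
    rw [PySem.Chars.splitOn.go]
    have hp : sep.isPrefixOf (c :: rest) = false := by
      rw [Bool.eq_false_iff]
      intro hx
      exact hno 0 (by simpa using List.isPrefixOf_iff_prefix.mp hx)
    simp only [hp, Bool.false_eq_true, if_false]
    have he := ih (fuel := fuel) (cur := c :: cur) (fun j => by simpa using hno (j + 1))
      (by simp at hf ⊢; omega)
    rw [he]
    simp

lemma pv_go_yes (sep : List Char) (hsep : sep ≠ []) (p : Nat) (fuel : Nat) (l cur : List Char)
    (acc : List (List Char)) (hp : sep <+: l.drop p) (hmin : ∀ i < p, ¬ sep <+: l.drop i)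
    (hf : l.length < fuel) :
    ∃ out, out ≠ [] ∧
      PySem.Chars.splitOn.go sep fuel l cur acc = acc.reverse ++ (cur.reverse ++ l.take p) :: out := by
  induction p generalizing l cur fuel acc with
  | zero =>
    simp only [List.drop_zero] at hp
    cases l with
    | nil =>
      exact absurd (List.prefix_nil.mp hp) hsep
    | cons c rest =>
      obtain ⟨fuel, rfl⟩ : ∃ f, fuel = f + 1 := ⟨fuel - 1, by omega⟩
      rw [PySem.Chars.splitOn.go]
      have hpb : sep.isPrefixOf (c :: rest) = true := List.isPrefixOf_iff_prefix.mpr hp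
      simp only [hpb, if_true]
      obtain ⟨out, hne, he⟩ := pv_go_acc sep fuel (List.drop sep.length (c :: rest)) [] (cur.reverse :: acc)
      exact ⟨out, hne, by rw [he]; simp⟩
  | succ p ih =>
    cases l with
    | nil =>
      rw [List.drop_nil] at hp
      exact absurd (List.prefix_nil.mp hp) hsep
    | cons c rest =>
      obtain ⟨fuel, rfl⟩ : ∃ f, fuel = f + 1 := ⟨fuel - 1, by omega⟩
      rw [PySem.Chars.splitOn.go]
      have hpb : sep.isPrefixOf (c :: rest) = false := by
        rw [Bool.eq_false_iff]
        intro hx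
        exact hmin 0 (by omega) (by simpa using List.isPrefixOf_iff_prefix.mp hx)
      simp only [hpb, Bool.false_eq_true, if_false]
      obtain ⟨out, hne, he⟩ := ih (l := rest) (cur := c :: cur) (fuel := fuel) (acc := acc)
        (by simpa using hp) (fun i hi => by simpa using hmin (i + 1) (by omega))
        (by simp at hf ⊢; omega)
      refine ⟨out, hne, ?_⟩
      rw [he]
      simp

lemma pv_step_no (st stop : List Char) (h : ¬ stop <:+: st) :
    pvCleanStep st stop = st := by
  have hno : ∀ j, ¬ stop <+: st.drop j := fun j hj => h (pv_infix_of_prefix_drop st stop j hj)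
  have hsp : PySem.Chars.splitOn st stop = [st] := by
    rw [PySem.Chars.splitOn, pv_go_no stop (st.length + 1) st [] [] hno (by omega)]
    simp
  simp [pvCleanStep, hsp]

lemma pv_step_yes (st stop : List Char) (hsep : stop ≠ []) (h : 0 ≤ PySem.Chars.find st stop) :
    pvCleanStep st stop = PySem.Chars.strip (st.take (PySem.Chars.find st stop).toNat) := by
  obtain ⟨h1, h2⟩ := PySem.Chars.find_spec h
  obtain ⟨out, hne, he⟩ := pv_go_yes stop hsep (PySem.Chars.find st stop).toNat (st.length + 1)
    st [] [] h1 h2 (by omega)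
  have hsp : PySem.Chars.splitOn st stop = st.take (PySem.Chars.find st stop).toNat :: out := by
    rw [PySem.Chars.splitOn, he]; simp
  have hlen : 1 < (PySem.Chars.splitOn st stop).length := by
    rw [hsp]; simp
    exact List.length_pos_iff.mpr hne
  rw [hsp] at hlen
  simp only [pvCleanStep, hsp, PySem.List.pyGetD_zero_cons, if_pos hlen]

-- ---- occurrence geometry ----
lemma pv_prefix_drop_lt (S t : List Char) (q : Nat) (ht : t ≠ []) (hq : t <+: S.drop q) :
    q + t.length ≤ S.length := by
  have := hq.length_le
  have h1 : 0 < t.length := List.length_pos_iff.mpr ht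
  simp [List.length_drop] at this
  omega

lemma pv_getElem_of_prefix_drop (S t : List Char) (q k : Nat) (hq : t <+: S.drop q)
    (hk : k < t.length) (hS : q + k < S.length) : t[k] = S[q + k] := by
  have he : t = (S.drop q).take t.length := List.prefix_iff_eq_take.mp hq
  calc t[k] = ((S.drop q).take t.length)[k]'(by rw [← he]; exact hk) := by
        congr 1
  _ = (S.drop q)[k]'(by simp [List.length_drop]; omega) := List.getElem_take
  _ = S[q + k] := List.getElem_drop

lemma pv_T3 (S s t : List Char) (pN r : Nat)
    (hocc : s <+: S.drop pN) (hGt : pvGood t) (hOv : pvNoOv t s)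
    (hC : ∀ j (hj : j < S.length), r ≤ j → j < pN → PySem.Chars.isspace (S[j]'hj) = true)
    (qN : Nat) (hq : t <+: S.drop qN) (hqp : qN < pN) :
    qN + t.length ≤ r := by
  obtain ⟨htne, hlast⟩ := hGt
  have hlen : 0 < t.length := List.length_pos_iff.mpr htne
  have hqS : qN + t.length ≤ S.length := pv_prefix_drop_lt S t qN htne hq
  by_cases hstr : qN + t.length ≤ pN
  · -- no straddle: the last char of t sits at index qN + |t| - 1 < pN and is not whitespace
    by_contra hcon
    push_neg at hcon
    have hj : qN + (t.length - 1) < S.length := by omega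
    have e1 : t[t.length - 1]'(by omega) = S[qN + (t.length - 1)]'hj :=
      pv_getElem_of_prefix_drop S t qN (t.length - 1) hq (by omega) hj
    have e2 : t.getLast htne = t[t.length - 1]'(by omega) := List.getLast_eq_getElem htne
    have hws := hC (qN + (t.length - 1)) hj (by omega) (by omega)
    rw [← e1, ← e2, hlast htne] at hws
    simp at hws
  · -- straddle: t.drop d and s are both prefixes of S.drop pN
    exfalso
    have hd : pN - qN < t.length := by omega
    have hd0 : 0 < pN - qN := by omega
    have he : t = (S.drop qN).take t.length := List.prefix_iff_eq_take.mp hq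
    have hdp : t.drop (pN - qN) <+: S.drop pN := by
      rw [he, List.drop_take]
      have : (S.drop qN).drop (pN - qN) = S.drop pN := by
        rw [List.drop_drop]; congr 1; omega
      rw [this]
      exact List.take_prefix _ _
    rcases List.prefix_or_prefix_of_prefix hdp hocc with hcase | hcase
    · exact hOv (pN - qN) hd hd0 (Or.inl hcase)
    · exact hOv (pN - qN) hd hd0 (Or.inr hcase)


lemma pv_minCut_step (S s : List Char) (L' : List (List Char))
    (hS : PySem.Chars.strip S = S)
    (hGs : pvGood s) (hG : ∀ t ∈ L', pvGood t) (hOv : ∀ t ∈ L', pvNoOv t s)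
    (hF : 0 ≤ PySem.Chars.find S s) :
    pvMinCut (PySem.Chars.strip (S.take (PySem.Chars.find S s).toNat)) L' = pvMinCut S (s :: L') := by
  set pN := (PySem.Chars.find S s).toNat with hpN
  have hFe : PySem.Chars.find S s = (pN : Int) := (Int.toNat_of_nonneg hF).symm
  obtain ⟨hocc, hminS⟩ := PySem.Chars.find_spec hF
  set S' := PySem.Chars.strip (S.take pN) with hS'def
  have hsne : s ≠ [] := hGs.1
  have hslen : 0 < s.length := List.length_pos_iff.mpr hsne
  have hps : pN < S.length := by
    have := pv_prefix_drop_lt S s pN hsne hocc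
    omega
  -- S' = S.take r
  have hls : PySem.Chars.lstrip (S.take pN) = S.take pN := by
    apply pv_lstrip_of_head
    intro hl
    have h0 : 0 < S.length := by omega
    have e : (S.take pN)[0]'hl = S[0]'h0 := List.getElem_take
    rw [e]
    exact pv_stripped_head S hS h0
  have hS'r : S' = PySem.Chars.rstrip (S.take pN) := by
    rw [hS'def]
    show PySem.Chars.rstrip (PySem.Chars.lstrip (S.take pN)) = _
    rw [hls]
  set r := S'.length with hrdef
  have hrp : r ≤ pN := by
    have h1 : S' <+: S.take pN := by rw [hS'r]; exact pv_rstrip_prefix _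
    have := h1.length_le
    simp [List.length_take] at this
    omega
  have hS'take : S' = S.take r := by
    rw [hS'r, hrdef, hS'r]
    rw [pv_rstrip_eq_take (S.take pN), List.take_take]
    congr 1
    have h1 := (pv_rstrip_prefix (S.take pN)).length_le
    simp [List.length_take] at h1 ⊢
    omega
  have hC : ∀ j (hj : j < S.length), r ≤ j → j < pN → PySem.Chars.isspace (S[j]'hj) = true := by
    intro j hj h1 h2
    have hjt : j < (S.take pN).length := by simp [List.length_take]; omega
    have := pv_rstrip_drop_ws (S.take pN) j (by rw [← hS'r]; exact h1) hjt
    rwa [List.getElem_take (h := hjt)] at this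
  -- the occurrence-transfer facts
  have hT3 : ∀ t ∈ L', 0 ≤ PySem.Chars.find S t → (PySem.Chars.find S t).toNat < pN →
      (PySem.Chars.find S t).toNat + t.length ≤ r := by
    intro t ht h0 hlt
    exact pv_T3 S s t pN r hocc (hG t ht) (hOv t ht) hC
      (PySem.Chars.find S t).toNat (PySem.Chars.find_spec h0).1 hlt
  have hT1 : ∀ t ∈ L', 0 ≤ PySem.Chars.find S t →
      (PySem.Chars.find S t).toNat + t.length ≤ r →
      PySem.Chars.find S' t = PySem.Chars.find S t := by
    intro t ht h0 hle
    set qN := (PySem.Chars.find S t).toNat with hqN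
    obtain ⟨h1, h2⟩ := PySem.Chars.find_spec h0
    have hq' : t <+: S'.drop qN := by
      rw [hS'take, List.drop_take]
      rw [List.prefix_take_iff]
      exact ⟨h1, by omega⟩
    have hmin' : ∀ i < qN, ¬ t <+: S'.drop i := by
      intro i hi hcon
      rw [hS'take, List.drop_take, List.prefix_take_iff] at hcon
      exact h2 i hi hcon.1
    rw [pv_find_eq_of S' t qN hq' hmin', hqN, Int.toNat_of_nonneg h0]
  have hT2 : ∀ t ∈ L', ¬ (0 ≤ PySem.Chars.find S t ∧ (PySem.Chars.find S t).toNat + t.length ≤ r) →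
      PySem.Chars.find S' t = -1 := by
    intro t ht hncond
    rw [PySem.Chars.find_eq_neg_one_iff]
    intro hinf
    obtain ⟨j, hj⟩ := (PySem.Chars.exists_prefix_drop_iff_isIn t S').mpr
      ((PySem.Chars.isIn_iff_infix t S').mpr hinf)
    rw [hS'take, List.drop_take, List.prefix_take_iff] at hj
    obtain ⟨hj1, hj2⟩ := hj
    have htne : t ≠ [] := (hG t ht).1
    have htlen : 0 < t.length := List.length_pos_iff.mpr htne
    have h0 : 0 ≤ PySem.Chars.find S t := by
      rw [PySem.Chars.find_nonneg_iff]
      exact pv_infix_of_prefix_drop S t j hj1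
    obtain ⟨h1, h2⟩ := PySem.Chars.find_spec h0
    have hqj : (PySem.Chars.find S t).toNat ≤ j := by
      by_contra hcon
      exact h2 j (by omega) hj1
    have : (PySem.Chars.find S t).toNat < pN := by omega
    exact hncond ⟨h0, hT3 t ht h0 this⟩
  -- positions
  set posL := ((L'.map (fun stop => PySem.Chars.find S stop)).filter
      (fun p => decide (p ≠ -1))) with hposL
  set posL' := ((L'.map (fun stop => PySem.Chars.find S' stop)).filter
      (fun p => decide (p ≠ -1))) with hposL'
  have hpos_cons : (((s :: L').map (fun stop => PySem.Chars.find S stop)).filter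
      (fun p => decide (p ≠ -1))) = (pN : Int) :: posL := by
    simp only [List.map_cons, hFe]
    rw [List.filter_cons_of_pos (by simp)]
  rcases hmm' : PySem.List.min? posL' id with _ | m'
  · -- no stopword survives in S'
    have hempty : ∀ t ∈ L', PySem.Chars.find S' t = -1 := by
      have he : posL' = [] := (PySem.List.min?_eq_none_iff posL' id).mp hmm'
      intro t ht
      by_contra hcon
      have : PySem.Chars.find S' t ∈ posL' := by
        rw [hposL']
        apply List.mem_filter.mpr
        exact ⟨List.mem_map.mpr ⟨t, ht, rfl⟩, by simpa using hcon⟩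
      rw [he] at this
      simp at this
    -- min over S is pN
    have hmin_eq : PySem.List.min? (((s :: L').map (fun stop => PySem.Chars.find S stop)).filter
        (fun p => decide (p ≠ -1))) id = some ((pN : Int)) := by
      rw [hpos_cons]
      rcases hmm : PySem.List.min? ((pN : Int) :: posL) id with _ | m
      · have := (PySem.List.min?_eq_none_iff _ id).mp hmm
        simp at this
      · have hmem := PySem.List.min?_mem hmm
        have hle := PySem.List.min?_isMin hmm ((pN : Int)) (by simp)
        have hge : (pN : Int) ≤ m := by
          rcases List.mem_cons.mp hmem with he | hm
          · omega
          · rw [hposL] at hm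
            obtain ⟨hmap, hne⟩ := List.mem_filter.mp hm
            obtain ⟨t, ht, hte⟩ := List.mem_map.mp hmap
            simp at hne
            have h0 : 0 ≤ m := by
              have := PySem.Chars.neg_one_le_find S t
              rw [hte] at this
              omega
            by_contra hcon
            have hlt : m.toNat < pN := by omega
            have hcond := hT3 t ht (by rw [hte]; omega) (by rw [hte]; exact_mod_cast hlt)
            have := hT1 t ht (by rw [hte]; omega) hcond
            rw [hte] at this
            rw [hempty t ht] at this
            omega
        have : m = (pN : Int) := le_antisymm (by simpa using hle) hge
        rw [this]
    rw [pvMinCut, pvMinCut, hmin_eq, hmm']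
    simp only [Int.toNat_natCast]
    rw [← hS'def]
  · -- the minimum survivor m' is the global cut
    have hmem' := PySem.List.min?_mem hmm'
    rw [hposL'] at hmem'
    obtain ⟨hmap', hne'⟩ := List.mem_filter.mp hmem'
    obtain ⟨t, ht, hte⟩ := List.mem_map.mp hmap'
    simp at hne'
    have hcond : 0 ≤ PySem.Chars.find S t ∧ (PySem.Chars.find S t).toNat + t.length ≤ r := by
      by_contra hcon
      rw [hT2 t ht hcon] at hte
      exact hne' hte.symm
    have hm'S : m' = PySem.Chars.find S t := by
      rw [← hte, hT1 t ht hcond.1 hcond.2]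
    have htlen : 0 < t.length := List.length_pos_iff.mpr (hG t ht).1
    have h0m' : 0 ≤ m' := by rw [hm'S]; exact hcond.1
    have hm'r : m'.toNat < r := by
      rw [hm'S]
      omega
    have hm'mem : m' ∈ (((s :: L').map (fun stop => PySem.Chars.find S stop)).filter
        (fun p => decide (p ≠ -1))) := by
      rw [hpos_cons]
      apply List.mem_cons.mpr
      right
      rw [hposL]
      apply List.mem_filter.mpr
      refine ⟨List.mem_map.mpr ⟨t, ht, hm'S.symm⟩, by simp; omega⟩
    have hm'le : ∀ y ∈ (((s :: L').map (fun stop => PySem.Chars.find S stop)).filter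
        (fun p => decide (p ≠ -1))), m' ≤ y := by
      intro y hy
      rw [hpos_cons] at hy
      rcases List.mem_cons.mp hy with he | hm
      · rw [he]; omega
      · rw [hposL] at hm
        obtain ⟨hmap, hne⟩ := List.mem_filter.mp hm
        obtain ⟨u, hu, hue⟩ := List.mem_map.mp hmap
        simp at hne
        have h0y : 0 ≤ y := by
          have := PySem.Chars.neg_one_le_find S u
          rw [hue] at this
          omega
        by_cases hcu : 0 ≤ PySem.Chars.find S u ∧ (PySem.Chars.find S u).toNat + u.length ≤ r
        · have := hT1 u hu hcu.1 hcu.2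
          have hymem : y ∈ posL' := by
            rw [hposL']
            apply List.mem_filter.mpr
            refine ⟨List.mem_map.mpr ⟨u, hu, by rw [this, hue]⟩, by simp; omega⟩
          have := PySem.List.min?_isMin hmm' y hymem
          simpa using this
        · have hple : pN ≤ (PySem.Chars.find S u).toNat := by
            by_contra hcon
            exact hcu ⟨by rw [hue]; exact h0y, hT3 u hu (by rw [hue]; exact h0y) (by omega)⟩
          rw [← hue]
          have : (m' : Int).toNat < pN := by omega
          omega
    have hmin_eq : PySem.List.min? (((s :: L').map (fun stop => PySem.Chars.find S stop)).filter
        (fun p => decide (p ≠ -1))) id = some m' := by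
      rcases hmm : PySem.List.min? (((s :: L').map (fun stop => PySem.Chars.find S stop)).filter
          (fun p => decide (p ≠ -1))) id with _ | m
      · have := (PySem.List.min?_eq_none_iff _ id).mp hmm
        rw [this] at hm'mem
        simp at hm'mem
      · have h1 := hm'le m (PySem.List.min?_mem hmm)
        have h2 := PySem.List.min?_isMin hmm m' hm'mem
        simp at h2
        have : m = m' := le_antisymm h2 h1
        rw [this]
    rw [pvMinCut, pvMinCut, hmin_eq, hmm']
    simp only []
    rw [hS'take, List.take_take]
    congr 2
    omega

lemma pv_main (L : List (List Char)) (hG : ∀ t ∈ L, pvGood t)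
    (hN : ∀ s ∈ L, ∀ t ∈ L, pvNoOv t s) :
    ∀ S, PySem.Chars.strip S = S → L.foldl pvCleanStep S = pvMinCut S L := by
  induction L with
  | nil =>
    intro S hS
    simp [pvMinCut, (PySem.List.min?_eq_none_iff ([] : List Int) id).mpr rfl]
  | cons s L' ih =>
    intro S hS
    have hGs : pvGood s := hG s (by simp)
    have hG' : ∀ t ∈ L', pvGood t := fun t ht => hG t (by simp [ht])
    have hN' : ∀ u ∈ L', ∀ t ∈ L', pvNoOv t u :=
      fun u hu t ht => hN u (by simp [hu]) t (by simp [ht])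
    have hOv : ∀ t ∈ L', pvNoOv t s := fun t ht => hN s (by simp) t (by simp [ht])
    rcases (by have := PySem.Chars.neg_one_le_find S s; omega : PySem.Chars.find S s = -1 ∨ 0 ≤ PySem.Chars.find S s) with hF | hF
    · rw [List.foldl_cons,
        pv_step_no S s ((PySem.Chars.find_eq_neg_one_iff S s).mp hF),
        ih hG' hN' S hS]
      rw [pvMinCut, pvMinCut]
      simp only [List.map_cons, hF]
      rw [List.filter_cons_of_neg (by simp)]
    · rw [List.foldl_cons, pv_step_yes S s hGs.1 hF,
        ih hG' hN' _ (pv_strip_idem _),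
        pv_minCut_step S s L' hS hGs hG' hOv hF]


lemma pv_minCut_stripped (S : List Char) (hS : PySem.Chars.strip S = S)
    (L : List (List Char)) :
    PySem.Chars.strip (pvMinCut S L) = pvMinCut S L := by
  rw [pvMinCut]
  rcases PySem.List.min? ((L.map (fun stop => PySem.Chars.find S stop)).filter
      (fun p => decide (p ≠ -1))) id with _ | m
  · exact hS
  · exact pv_strip_idem _

-- ===== VERDICT (by name: the statement is the Claim_ definition above) =====
theorem clean_story_spec : Claim_equal_clean_story := by
  intro text prompt _
  show clean_story text prompt = clean_story_alt text prompt
  rw [clean_story, clean_story_alt]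
  set S := PySem.Chars.strip (PySem.Chars.replace text.toList prompt.toList []) with hSdef
  have hS : PySem.Chars.strip S = S := pv_strip_idem _
  have hG : ∀ t ∈ pvStopwords, pvGood t := by unfold pvGood; decide
  have hN : ∀ s ∈ pvStopwords, ∀ t ∈ pvStopwords, pvNoOv t s := by unfold pvNoOv; decide
  rw [pv_main pvStopwords hG hN S hS, pv_minCut_stripped S hS]
  rw [pvMinCut]
  rcases hmm : PySem.List.min? ((pvStopwords.map (fun stop => PySem.Chars.find S stop)).filter
      (fun p => decide (p ≠ -1))) id with _ | m
  · rfl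
  · have hmem := PySem.List.min?_mem hmm
    obtain ⟨hmap, hne⟩ := List.mem_filter.mp hmem
    obtain ⟨t, ht, hte⟩ := List.mem_map.mp hmap
    simp at hne
    have h0 : 0 ≤ m := by
      have := PySem.Chars.neg_one_le_find S t
      rw [hte] at this
      omega
    simp [PySem.List.slice_to S h0]
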